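-- pv_equiv track=rewrite | github.com/ryandchandra/ii4031-tucil-2 | ModifiedRC4Lib.py | PermutationDecrypt
-- ===== SOURCE A (Python) =====
-- def PermutationDecrypt(byteintarray,block_length):
--     modified_byteintarray = byteintarray
--     array_length = len(byteintarray)
--
--     i = 0
--     while (i<array_length):
--         if (i!=array_length-1):
--             modified_byteintarray[i], modified_byteintarray[i+1] = modified_byteintarray[i+1], modified_byteintarray[i]
--             i = i + 2
--         else:
--             i = i + 1
--
--     for i in range(array_length):
--         offset = i//block_length + 1
--         modified_byteintarray[i] = (modified_byteintarray[i] - offset)%256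
--
--     return modified_byteintarray
-- ===== SOURCE B (Python) =====
-- def PermutationDecrypt(byteintarray, block_length):
--     # Single fused pass in steps of 2: swap each pair and apply both
--     # per-index offsets immediately; a trailing odd element gets only
--     # its offset. Mutates byteintarray in place, like the original.
--     n = len(byteintarray)
--     i = 0
--     while i + 1 < n:
--         a, b = byteintarray[i], byteintarray[i + 1]
--         byteintarray[i] = (b - (i // block_length + 1)) % 256
--         byteintarray[i + 1] = (a - ((i + 1) // block_length + 1)) % 256
--         i += 2
--     if i < n:
--         byteintarray[i] = (byteintarray[i] - (i // block_length + 1)) % 256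
--     return byteintarray
-- ===== Notes on version B (the rewrite author's own statement) =====
-- stated objective: alternative
-- what changed: Replaces A's two separate passes (a swap-while-loop then an offset for-loop) by one fused loop that walks the array in steps of 2, swapping each pair and applying both per-index offsets at once.
import Mathlib
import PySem

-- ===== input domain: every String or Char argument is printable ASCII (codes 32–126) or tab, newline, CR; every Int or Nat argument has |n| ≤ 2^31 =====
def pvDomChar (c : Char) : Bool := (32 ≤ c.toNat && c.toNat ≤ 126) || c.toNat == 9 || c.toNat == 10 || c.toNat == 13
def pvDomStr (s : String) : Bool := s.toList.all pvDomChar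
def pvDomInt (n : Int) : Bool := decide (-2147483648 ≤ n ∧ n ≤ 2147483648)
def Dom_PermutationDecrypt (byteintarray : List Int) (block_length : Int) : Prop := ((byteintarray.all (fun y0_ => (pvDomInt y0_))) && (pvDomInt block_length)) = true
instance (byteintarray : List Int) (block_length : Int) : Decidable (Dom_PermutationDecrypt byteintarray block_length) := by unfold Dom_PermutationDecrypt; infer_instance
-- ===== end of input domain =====

-- ===== PORT A =====
-- B fuses A's two passes into one step-2 loop; equivalence of return values is proved
-- (both Pythons mutate the argument list in place; the claim is about the return value).
-- While loop of A: swaps adjacent pairs (i, i+1), leaving a trailing odd element alone.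
def pvASwap : List Int → List Int
  | a :: b :: rest => b :: a :: pvASwap rest
  | xs => xs

-- For loop of A: subtract (i // block_length + 1) from element i, mod 256.
def pvAOffset (bl : Int) (i : Int) : List Int → List Int
  | [] => []
  | x :: rest => PySem.Int.mod (x - (PySem.Int.floordiv i bl + 1)) 256 :: pvAOffset bl (i + 1) rest

def PermutationDecrypt (byteintarray : List Int) (block_length : Int) : List Int :=
  pvAOffset block_length 0 (pvASwap byteintarray)

-- ===== PORT B =====
-- Single fused pass of Source B: swap the pair at (i, i+1) and apply both offsets at once;
-- a trailing odd element gets only its offset.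
def pvBGo (bl : Int) (i : Int) : List Int → List Int
  | a :: b :: rest =>
      PySem.Int.mod (b - (PySem.Int.floordiv i bl + 1)) 256 ::
      PySem.Int.mod (a - (PySem.Int.floordiv (i + 1) bl + 1)) 256 ::
      pvBGo bl (i + 2) rest
  | [x] => [PySem.Int.mod (x - (PySem.Int.floordiv i bl + 1)) 256]
  | [] => []

def PermutationDecrypt_alt (byteintarray : List Int) (block_length : Int) : List Int :=
  pvBGo block_length 0 byteintarray

-- ===== PRECONDITION & SPEC =====
-- Pre_ excludes only inputs where Python A raises ZeroDivisionError: a nonempty array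
-- with block_length = 0 (B raises there too).
def Pre_PermutationDecrypt (byteintarray : List Int) (block_length : Int) : Prop :=
  byteintarray = [] ∨ block_length ≠ 0
instance (byteintarray : List Int) (block_length : Int) : Decidable (Pre_PermutationDecrypt byteintarray block_length) := by unfold Pre_PermutationDecrypt; infer_instance

def pvWitness_PermutationDecrypt : List Int × Int := ([97, 98, 99], 2)

def Spec_PermutationDecrypt (byteintarray : List Int) (block_length : Int) (out : List Int) : Prop := out = PermutationDecrypt_alt byteintarray block_length
instance (byteintarray : List Int) (block_length : Int) (out : List Int) : Decidable (Spec_PermutationDecrypt byteintarray block_length out) := by unfold Spec_PermutationDecrypt; infer_instance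

-- ===== CLAIM (what is proved, stated in full; the proofs are below) =====
def Claim_equal_PermutationDecrypt : Prop := ∀ (byteintarray : List Int) (block_length : Int), Dom_PermutationDecrypt byteintarray block_length → Pre_PermutationDecrypt byteintarray block_length → Spec_PermutationDecrypt byteintarray block_length (PermutationDecrypt byteintarray block_length)

-- ===== LEMMAS AND PROOFS =====
-- Offsetting the pair-swapped list equals the fused pass, for any starting index.
theorem pvFuse : ∀ (xs : List Int) (bl i : Int),
    pvAOffset bl i (pvASwap xs) = pvBGo bl i xs
  | [], _, _ => rfl
  | [_], _, _ => rfl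
  | a :: b :: rest, bl, i => by
      simp only [pvASwap, pvAOffset, pvBGo]
      rw [show i + 1 + 1 = i + 2 by ring, pvFuse rest bl (i + 2)]

-- ===== VERDICT (by name: the statement is the Claim_ definition above) =====
theorem PermutationDecrypt_spec : Claim_equal_PermutationDecrypt := by
  intro xs bl _ _
  unfold Spec_PermutationDecrypt PermutationDecrypt PermutationDecrypt_alt
  exact pvFuse xs bl 0
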